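-- pv_equiv track=rewrite | github.com/RogerDevCode/basic-booking | scripts/fix-all-contracts.py | extract_all_returns
-- ===== SOURCE A (Python) =====
-- def extract_all_returns(code):
--     """Extract all return statements with line numbers"""
--     lines = code.split('\n')
--     returns = []
--
--     in_return = False
--     return_buffer = []
--     brace_count = 0
--
--     for i, line in enumerate(lines, 1):
--         if 'return' in line and not in_return:
--             in_return = True
--             return_buffer = [(i, line)]
--             brace_count = line.count('{') - line.count('}')
--
--             # Check if single-line return
--             if brace_count <= 0 and (';' in line or ']' in line):
--                 returns.append(return_buffer)
--                 in_return = False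
--                 return_buffer = []
--                 brace_count = 0
--         elif in_return:
--             return_buffer.append((i, line))
--             brace_count += line.count('{') - line.count('}')
--
--             if brace_count <= 0 and (';' in line or ']' in line):
--                 returns.append(return_buffer)
--                 in_return = False
--                 return_buffer = []
--                 brace_count = 0
--
--     return returns
-- ===== SOURCE B (Python) =====
-- def extract_all_returns(code):
--     """Extract all return statements with line numbers"""
--     lines = code.split('\n')
--     n = len(lines)
--     results = []
--     i = 0
--     while i < n:
--         if 'return' in lines[i]:
--             buf = []
--             bc = 0
--             j = i
--             while j < n:
--                 line = lines[j]
--                 buf.append((j + 1, line))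
--                 bc += line.count('{') - line.count('}')
--                 if bc <= 0 and (';' in line or ']' in line):
--                     results.append(buf)
--                     break
--                 j += 1
--             i = j + 1
--         else:
--             i += 1
--     return results
-- ===== Notes on version B (the rewrite author's own statement) =====
-- stated objective: alternative
-- what changed: Replaces the boolean-flag state machine over one enumerate pass with an index-based outer scan plus an inner collecting while-loop that consumes each return statement's lines and resumes after them; a trailing unterminated return is discarded by falling off the inner loop rather than by dropping leftover flag state.
import Mathlib
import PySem

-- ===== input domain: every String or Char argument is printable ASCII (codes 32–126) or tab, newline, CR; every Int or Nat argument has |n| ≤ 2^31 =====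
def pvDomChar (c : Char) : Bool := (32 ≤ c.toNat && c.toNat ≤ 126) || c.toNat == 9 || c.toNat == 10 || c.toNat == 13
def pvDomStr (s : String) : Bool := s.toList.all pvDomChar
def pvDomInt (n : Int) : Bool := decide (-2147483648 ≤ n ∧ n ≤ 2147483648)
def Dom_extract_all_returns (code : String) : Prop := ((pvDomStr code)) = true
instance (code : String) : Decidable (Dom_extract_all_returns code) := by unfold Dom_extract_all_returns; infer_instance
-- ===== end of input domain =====

-- B restructures A's boolean-flag state machine as an outer index scan with an inner
-- collecting loop (objective: alternative decomposition, same cost).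

-- ===== PORT A =====
-- state: (returns, in_return, return_buffer, brace_count)
def aStep (st : List (List (Int × String)) × Bool × List (Int × String) × Int)
    (p : Int × String) : List (List (Int × String)) × Bool × List (Int × String) × Int :=
  let (returns, in_return, return_buffer, brace_count) := st
  let (i, line) := p
  if PySem.Str.isIn "return" line && !in_return then
    let return_buffer := [(i, line)]
    let brace_count : Int := (PySem.Str.count line "{" : Int) - (PySem.Str.count line "}" : Int)
    if brace_count ≤ 0 && (PySem.Str.isIn ";" line || PySem.Str.isIn "]" line) then
      (returns ++ [return_buffer], false, [], 0)
    else
      (returns, true, return_buffer, brace_count)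
  else if in_return then
    let return_buffer := return_buffer ++ [(i, line)]
    let brace_count := brace_count + (PySem.Str.count line "{" : Int) - (PySem.Str.count line "}" : Int)
    if brace_count ≤ 0 && (PySem.Str.isIn ";" line || PySem.Str.isIn "]" line) then
      (returns ++ [return_buffer], false, [], 0)
    else
      (returns, true, return_buffer, brace_count)
  else
    (returns, in_return, return_buffer, brace_count)

def extract_all_returns (code : String) : List (List (Int × String)) :=
  let lines := (PySem.Str.split? code "\n").getD []
  ((PySem.List.enumerate lines 1).foldl aStep ([], false, [], 0)).1

-- ===== PORT B =====
-- inner while loop: consumes lines, returns (finished buffer?, last index consumed, remaining lines)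
def bInner (j : Int) (buf : List (Int × String)) (bc : Int) :
    List String → Option (List (Int × String)) × Int × List String
  | [] => (none, j, [])
  | line :: rest =>
    let buf' := buf ++ [(j + 1, line)]
    let bc' := bc + (PySem.Str.count line "{" : Int) - (PySem.Str.count line "}" : Int)
    if bc' ≤ 0 && (PySem.Str.isIn ";" line || PySem.Str.isIn "]" line) then
      (some buf', j, rest)
    else
      bInner (j + 1) buf' bc' rest

theorem bInner_len (ls : List String) : ∀ j buf bc, (bInner j buf bc ls).2.2.length ≤ ls.length := by
  induction ls with
  | nil => intro j buf bc; simp [bInner]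
  | cons line rest ih =>
    intro j buf bc
    simp only [bInner]
    split
    · simp
    · exact le_trans (ih _ _ _) (by simp)

theorem bInner_len_cons (i : Int) (buf : List (Int × String)) (bc : Int) (line : String)
    (rest : List String) : (bInner i buf bc (line :: rest)).2.2.length < (line :: rest).length := by
  simp only [bInner]
  split
  · simp
  · exact Nat.lt_succ_of_le (bInner_len rest _ _ _)

def bOuter (i : Int) (ls : List String) : List (List (Int × String)) :=
  match ls with
  | [] => []
  | line :: rest =>
    if PySem.Str.isIn "return" line then
      let r := bInner i [] 0 (line :: rest)
      (match r.1 with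
       | some buf => [buf]
       | none => []) ++ bOuter (r.2.1 + 1) r.2.2
    else
      bOuter (i + 1) rest
termination_by ls.length
decreasing_by
  · exact bInner_len_cons i [] 0 line rest
  · simp

def extract_all_returns_alt (code : String) : List (List (Int × String)) :=
  bOuter 0 ((PySem.Str.split? code "\n").getD [])

-- ===== PRECONDITION & SPEC =====
def Spec_extract_all_returns (code : String) (out : List (List (Int × String))) : Prop := out = extract_all_returns_alt code
instance (code : String) (out : List (List (Int × String))) : Decidable (Spec_extract_all_returns code out) := by unfold Spec_extract_all_returns; infer_instance

-- ===== CLAIM (what is proved, stated in full; the proofs are below) =====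
def Claim_equal_extract_all_returns : Prop := ∀ (code : String), Dom_extract_all_returns code → Spec_extract_all_returns code (extract_all_returns code)

-- ===== LEMMAS AND PROOFS =====

theorem bInner_none (ls : List String) : ∀ j buf bc,
    (bInner j buf bc ls).1 = none → (bInner j buf bc ls).2.2 = [] := by
  induction ls with
  | nil => intro j buf bc _; simp [bInner]
  | cons line rest ih =>
    intro j buf bc
    simp only [bInner]
    split
    · simp
    · exact ih _ _ _

-- A's in_return = true phase equals B's inner loop followed by the residual fold
theorem lemI (ls : List String) : ∀ j acc buf bc,
    ((PySem.List.enumerate ls (j + 1)).foldl aStep (acc, true, buf, bc)).1 =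
      match bInner j buf bc ls with
      | (some buf', j', rest') =>
          ((PySem.List.enumerate rest' (j' + 2)).foldl aStep (acc ++ [buf'], false, [], 0)).1
      | (none, _, _) => acc := by
  induction ls with
  | nil => intro j acc buf bc; simp [bInner, PySem.List.enumerate]
  | cons line rest ih =>
    intro j acc buf bc
    rw [PySem.List.enumerate_cons]
    simp only [List.foldl_cons, bInner]
    have hstep : aStep (acc, true, buf, bc) (j + 1, line) =
        (let buf' := buf ++ [(j + 1, line)]
         let bc' := bc + (PySem.Str.count line "{" : Int) - (PySem.Str.count line "}" : Int)
         if bc' ≤ 0 && (PySem.Str.isIn ";" line || PySem.Str.isIn "]" line) then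
           (acc ++ [buf'], false, [], 0)
         else
           (acc, true, buf', bc')) := by
      simp only [aStep]
      split
      · rename_i h; simp at h
      · rfl
    rw [hstep]
    simp only []
    split
    · rename_i h
      simp only []
      have : (j : Int) + 1 + 1 = j + 2 := by ring
      rw [this]
    · exact ih (j + 1) acc (buf ++ [(j + 1, line)])
        (bc + (PySem.Str.count line "{" : Int) - (PySem.Str.count line "}" : Int))

-- A's scan phase from a clean state equals B's outer loop
theorem lemO_aux (n : Nat) : ∀ (ls : List String), ls.length ≤ n → ∀ i acc,
    ((PySem.List.enumerate ls (i + 1)).foldl aStep (acc, false, [], 0)).1 =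
      acc ++ bOuter i ls := by
  induction n with
  | zero =>
    intro ls hls i acc
    have : ls = [] := List.eq_nil_of_length_eq_zero (Nat.le_zero.mp hls)
    subst this
    simp [bOuter, PySem.List.enumerate]
  | succ n ihn =>
  intro ls hls
  match ls with
  | [] => intro i acc; simp [bOuter, PySem.List.enumerate]
  | line :: rest =>
    intro i acc
    have ih : ∀ (ls' : List String), ls'.length < (line :: rest).length → ∀ i acc,
        ((PySem.List.enumerate ls' (i + 1)).foldl aStep (acc, false, [], 0)).1 =
          acc ++ bOuter i ls' := by
      intro ls' hlt
      exact ihn ls' (by simp only [List.length_cons] at hls hlt; omega)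
    rw [PySem.List.enumerate_cons]
    simp only [List.foldl_cons]
    by_cases hret : PySem.Str.isIn "return" line = true
    · have hstep : aStep (acc, false, [], 0) (i + 1, line) =
          (let bc : Int := (PySem.Str.count line "{" : Int) - (PySem.Str.count line "}" : Int)
           if bc ≤ 0 && (PySem.Str.isIn ";" line || PySem.Str.isIn "]" line) then
             (acc ++ [[(i + 1, line)]], false, [], 0)
           else
             (acc, true, [(i + 1, line)], bc)) := by
        simp only [aStep]
        rw [if_pos (by simpa using hret)]
      rw [hstep]
      have hBin : bInner i [] 0 (line :: rest) =
          (let bc' : Int := 0 + (PySem.Str.count line "{" : Int) - (PySem.Str.count line "}" : Int)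
           if bc' ≤ 0 && (PySem.Str.isIn ";" line || PySem.Str.isIn "]" line) then
             (some [(i + 1, line)], i, rest)
           else
             bInner (i + 1) [(i + 1, line)] bc' rest) := by
        simp [bInner]
      simp only []
      split
      · rename_i hterm
        -- single-line return
        have : (i : Int) + 1 + 1 = (i + 1) + 1 := by ring
        rw [this, ih rest (by simp) (i + 1) (acc ++ [[(i + 1, line)]])]
        rw [bOuter, if_pos hret, hBin]
        rw [if_pos (by rw [zero_add]; exact hterm)]
        simp
      · rename_i hterm
        -- multi-line: enter in_return state; apply lemI
        rw [lemI rest (i + 1) acc [(i + 1, line)] _]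
        rw [bOuter, if_pos hret, hBin]
        rw [if_neg (by rw [zero_add]; exact hterm)]
        rcases hBI : bInner (i + 1) [(i + 1, line)]
            (0 + (PySem.Str.count line "{" : Int) - (PySem.Str.count line "}" : Int)) rest with ⟨o, j', rest'⟩
        have hbc : (0 : Int) + (PySem.Str.count line "{" : Int) - (PySem.Str.count line "}" : Int)
            = (PySem.Str.count line "{" : Int) - (PySem.Str.count line "}" : Int) := by ring
        rw [hbc] at hBI
        rw [hBI]
        cases o with
        | some buf' =>
          simp only []
          have hlen : rest'.length < (line :: rest).length := by
            have := bInner_len rest (i + 1) [(i + 1, line)]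
              ((PySem.Str.count line "{" : Int) - (PySem.Str.count line "}" : Int))
            rw [hBI] at this
            simpa using Nat.lt_succ_of_le this
          have : (j' : Int) + 2 = (j' + 1) + 1 := by ring
          rw [this, ih rest' hlen (j' + 1) (acc ++ [buf'])]
          simp
        | none =>
          have hrest' : rest' = [] := by
            have := bInner_none rest (i + 1) [(i + 1, line)]
              ((PySem.Str.count line "{" : Int) - (PySem.Str.count line "}" : Int))
            rw [hBI] at this
            simpa using this rfl
          simp [hrest', bOuter]
    · have hstep : aStep (acc, false, [], 0) (i + 1, line) = (acc, false, [], 0) := by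
        simp only [aStep]
        rw [if_neg (by simpa using hret), if_neg (by simp)]
      rw [hstep]
      have : (i : Int) + 1 + 1 = (i + 1) + 1 := by ring
      rw [this, ih rest (by simp) (i + 1) acc]
      rw [bOuter, if_neg hret]

-- ===== VERDICT (by name: the statement is the Claim_ definition above) =====
theorem extract_all_returns_spec : Claim_equal_extract_all_returns := by
  intro code _
  unfold Spec_extract_all_returns extract_all_returns extract_all_returns_alt
  have := lemO_aux ((PySem.Str.split? code "\n").getD []).length ((PySem.Str.split? code "\n").getD []) (le_refl _) 0 []
  simpa using this
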